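-- pv_equiv track=rewrite | github.com/Micah-Ribbens/Spline-Generation | src/spline_generation/matrix_creator.py | get_full_row
-- ===== SOURCE A (Python) =====
-- def get_full_row(index, values, total_number_of_indexes, expected_value):
--     """:returns: the full row of values (the rest of the values are 0 except from 0 -> len(values). Here is an example:
--         get_full_row(1, [5, 6, 7, 8], 1) -> [0, 0, 0, 0, 5, 6, 7, 8]"""
--
--     return_value = []
--
--     for i in range(total_number_of_indexes):
--         if i == index:
--             return_value.extend(values)
--             continue
--
--         # Else add all the zeros
--         for j in range(len(values)):
--             return_value.append(0)
--
--     return_value.append(expected_value)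
--     return return_value
-- ===== SOURCE B (Python) =====
-- def get_full_row(index, values, total_number_of_indexes, expected_value):
--     vals = list(values)
--     n = len(vals)
--     # one flat pass over every output cell: cell k belongs to block k//n,
--     # and holds vals[k % n] iff that block is `index`, else 0.
--     # (when n == 0 the range is empty, so k // n is never evaluated)
--     row = [vals[k % n] if k // n == index else 0
--            for k in range(total_number_of_indexes * n)]
--     row.append(expected_value)
--     return row
-- ===== Notes on version B (the rewrite author's own statement) =====
-- stated objective: alternative
-- what changed: Instead of A's loop over block indices with an inner zero-appending loop, B makes a single flat pass over every output cell position k and computes each cell arithmetically from its divmod coordinates (block k//n, offset k%n).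
import Mathlib
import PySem

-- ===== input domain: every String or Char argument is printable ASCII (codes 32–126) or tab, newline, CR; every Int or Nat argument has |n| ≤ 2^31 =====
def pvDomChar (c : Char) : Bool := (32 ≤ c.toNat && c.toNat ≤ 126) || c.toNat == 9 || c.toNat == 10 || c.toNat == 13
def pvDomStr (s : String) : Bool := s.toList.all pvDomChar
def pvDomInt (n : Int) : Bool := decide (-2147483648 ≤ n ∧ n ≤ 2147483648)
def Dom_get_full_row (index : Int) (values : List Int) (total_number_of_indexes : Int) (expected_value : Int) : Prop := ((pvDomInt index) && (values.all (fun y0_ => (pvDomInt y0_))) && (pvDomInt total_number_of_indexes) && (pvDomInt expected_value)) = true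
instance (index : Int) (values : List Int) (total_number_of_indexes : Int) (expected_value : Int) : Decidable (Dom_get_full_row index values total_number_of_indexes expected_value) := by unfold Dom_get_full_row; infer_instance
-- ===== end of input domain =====

-- B replaces A's per-block loop (values block or an inner zero-appending loop) by one flat
-- pass over every output cell, computing each cell from its divmod coordinates (objective: alternative).

-- ===== PORT A =====
def get_full_row (index : Int) (values : List Int) (total_number_of_indexes : Int) (expected_value : Int) : List Int :=
  let return_value : List Int :=
    (PySem.List.pyRange 0 total_number_of_indexes 1).foldl
      (fun acc i =>
        if i = index then acc ++ values
        else (PySem.List.pyRange 0 (PySem.List.len values) 1).foldl (fun a _ => a ++ [(0 : Int)]) acc)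
      []
  return_value ++ [expected_value]

-- ===== PORT B =====
-- `vals[k % n]` never raises in Source B (0 ≤ k % n < n on every reached k), so `.getD 0` is exact.
def get_full_row_alt (index : Int) (values : List Int) (total_number_of_indexes : Int) (expected_value : Int) : List Int :=
  let n : Int := PySem.List.len values
  let row : List Int :=
    (PySem.List.pyRange 0 (total_number_of_indexes * n) 1).map
      (fun k =>
        if PySem.Int.floordiv k n = index
        then (PySem.List.pyGet? values (PySem.Int.mod k n)).getD 0
        else 0)
  row ++ [expected_value]

-- ===== PRECONDITION & SPEC =====
def Spec_get_full_row (index : Int) (values : List Int) (total_number_of_indexes : Int) (expected_value : Int) (out : List Int) : Prop := out = get_full_row_alt index values total_number_of_indexes expected_value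
instance (index : Int) (values : List Int) (total_number_of_indexes : Int) (expected_value : Int) (out : List Int) : Decidable (Spec_get_full_row index values total_number_of_indexes expected_value out) := by unfold Spec_get_full_row; infer_instance

-- ===== CLAIM =====
def Claim_equal_get_full_row : Prop := ∀ (index : Int) (values : List Int) (total_number_of_indexes : Int) (expected_value : Int), Dom_get_full_row index values total_number_of_indexes expected_value → Spec_get_full_row index values total_number_of_indexes expected_value (get_full_row index values total_number_of_indexes expected_value)

-- ===== LEMMAS AND PROOFS =====

-- A's outer loop as a flatMap over block indices
theorem outer_flatMap (index : Int) (values : List Int) (t : Int) :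
    (PySem.List.pyRange 0 t 1).foldl
      (fun acc i =>
        if i = index then acc ++ values
        else (PySem.List.pyRange 0 ((values.length : Int)) 1).foldl (fun a _ => a ++ [(0 : Int)]) acc)
      []
    = (PySem.List.pyRange 0 t 1).flatMap
        (fun i => if i = index then values else List.replicate values.length 0) := by
  have hbody : ∀ (acc : List Int) (i : Int), i ∈ PySem.List.pyRange 0 t 1 →
      (if i = index then acc ++ values
       else (PySem.List.pyRange 0 ((values.length : Int)) 1).foldl (fun a _ => a ++ [(0 : Int)]) acc)
      = acc ++ (if i = index then values else List.replicate values.length 0) := by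
    intro acc i _
    by_cases hi : i = index
    · simp [hi]
    · simp only [if_neg hi]
      simp
  have h2 := PySem.List.foldl_congr_mem
    (PySem.List.pyRange 0 t 1)
    (fun acc i =>
      if i = index then acc ++ values
      else (PySem.List.pyRange 0 ((values.length : Int)) 1).foldl (fun a _ => a ++ [(0 : Int)]) acc)
    (fun acc i => acc ++ (if i = index then values else List.replicate values.length 0))
    ([] : List Int) hbody
  rw [h2, PySem.List.foldl_append_eq_flatMap]
  simp

-- B's cell function over one block [s*n, s*n+n) is A's s-th block
theorem block_map (index : Int) (values : List Int) (s : Int)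
    (hn : 0 < (values.length : Int)) :
    (PySem.List.pyRange (s * values.length) (s * values.length + values.length) 1).map
      (fun k =>
        if PySem.Int.floordiv k (values.length : Int) = index
        then (PySem.List.pyGet? values (PySem.Int.mod k (values.length : Int))).getD 0
        else 0)
    = (if s = index then values else List.replicate values.length 0) := by
  set n : Int := (values.length : Int) with hndef
  have hdiv : ∀ j : Nat, j < values.length →
      PySem.Int.floordiv (s * n + (j : Int)) n = s := by
    intro j hj
    rw [PySem.Int.floordiv_eq_iff_of_pos hn]
    constructor
    · omega
    · have hjn : ((j : Int)) < n := by omega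
      nlinarith
  have hmod : ∀ j : Nat, j < values.length →
      PySem.Int.mod (s * n + (j : Int)) n = (j : Int) := by
    intro j hj
    have h1 := PySem.Int.floordiv_mul_add_mod (s * n + (j : Int)) n
    rw [hdiv j hj] at h1
    omega
  apply List.ext_getElem
  · rw [List.length_map, PySem.List.length_pyRange_one]
    by_cases hs : s = index <;> simp [hs] <;> omega
  · intro j h1 h2
    have hjlen : j < values.length := by
      rw [List.length_map, PySem.List.length_pyRange_one] at h1
      omega
    have hidx : j < (s * n + n - s * n).toNat := by omega
    rw [List.getElem_map, PySem.List.getElem_pyRange_one]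
    rw [hdiv j hjlen, hmod j hjlen]
    by_cases hs : s = index
    · simp only [if_pos hs, PySem.List.pyGet?_natCast,
        List.getElem?_eq_getElem hjlen, Option.getD_some]
    · simp only [if_neg hs, List.getElem_replicate]

-- the two shapes agree (Nat bound)
theorem flatMap_eq_map_nat (index : Int) (values : List Int) (m : Nat) :
    (PySem.List.pyRange 0 (m : Int) 1).flatMap
        (fun i => if i = index then values else List.replicate values.length 0)
    = (PySem.List.pyRange 0 ((m : Int) * (values.length : Int)) 1).map
        (fun k =>
          if PySem.Int.floordiv k (values.length : Int) = index
          then (PySem.List.pyGet? values (PySem.Int.mod k (values.length : Int))).getD 0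
          else 0) := by
  induction m with
  | zero => simp [PySem.List.pyRange_one_eq_nil]
  | succ s ih =>
    by_cases hn : values.length = 0
    · have hv : values = [] := List.eq_nil_of_length_eq_zero hn
      subst hv
      simp [PySem.List.pyRange_one_eq_nil]
    · have hnpos : 0 < (values.length : Int) := by exact_mod_cast Nat.pos_of_ne_zero hn
      rw [show ((s + 1 : Nat) : Int) = (s : Int) + 1 by push_cast; ring,
          PySem.List.pyRange_one_succ_right (by positivity : (0 : Int) ≤ (s : Int)),
          List.flatMap_append, ih]
      have hsplit : PySem.List.pyRange 0 (((s : Int) + 1) * (values.length : Int)) 1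
          = PySem.List.pyRange 0 ((s : Int) * (values.length : Int)) 1
            ++ PySem.List.pyRange ((s : Int) * (values.length : Int))
                 ((s : Int) * (values.length : Int) + (values.length : Int)) 1 := by
        have heq : ((s : Int) + 1) * (values.length : Int)
            = (s : Int) * (values.length : Int) + (values.length : Int) := by ring
        rw [heq]
        exact PySem.List.pyRange_one_append 0 _ _ (by positivity)
          (le_add_of_nonneg_right (by positivity))
      rw [hsplit, List.map_append, block_map index values (s : Int) hnpos]
      simp

-- the two shapes agree (every Int bound)
theorem flatMap_eq_map (index : Int) (values : List Int) (t : Int) :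
    (PySem.List.pyRange 0 t 1).flatMap
        (fun i => if i = index then values else List.replicate values.length 0)
    = (PySem.List.pyRange 0 (t * (values.length : Int)) 1).map
        (fun k =>
          if PySem.Int.floordiv k (values.length : Int) = index
          then (PySem.List.pyGet? values (PySem.Int.mod k (values.length : Int))).getD 0
          else 0) := by
  by_cases ht : 0 ≤ t
  · obtain ⟨m, rfl⟩ := Int.eq_ofNat_of_zero_le ht
    exact flatMap_eq_map_nat index values m
  · have h1 : t ≤ 0 := by omega
    have h2 : t * (values.length : Int) ≤ 0 :=
      mul_nonpos_of_nonpos_of_nonneg h1 (by positivity)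
    rw [PySem.List.pyRange_one_eq_nil (by omega), PySem.List.pyRange_one_eq_nil (by omega)]
    simp

-- ===== VERDICT =====
theorem get_full_row_spec : Claim_equal_get_full_row := by
  intro index values t ev _
  unfold Spec_get_full_row get_full_row get_full_row_alt
  simp only [PySem.List.len]
  rw [outer_flatMap, flatMap_eq_map]
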